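-- pv_equiv track=rewrite | github.com/ecatanzani/eFlux | assets/ExposureTimePlot/deploy.py | SplitDaysInfo
-- ===== SOURCE A (Python) =====
-- def SplitDaysInfo(days_info, days):
--     days_info_split = []
--     tmp_info_integrate = {}
--     for idx, tmp_date in enumerate(days_info):
--         tmp_info_integrate[tmp_date] = days_info[tmp_date]
--         if not (idx+1)%days:
--             days_info_split.append(tmp_info_integrate)
--             tmp_info_integrate = {}
--
--     if len(tmp_info_integrate):
--         days_info_split.append(tmp_info_integrate)
--     return days_info_split
-- ===== SOURCE B (Python) =====
-- def SplitDaysInfo(days_info, days):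
--     items = list(days_info.items())
--     return [dict(items[i:i + days]) for i in range(0, len(items), days)]
-- ===== Notes on version B (the rewrite author's own statement) =====
-- stated objective: idiomatic
-- what changed: B precomputes the item list once and builds each chunk by index-strided slicing (range(0, n, days)), replacing A's incremental accumulator dict flushed by a modulo test; Pre_ excludes days <= 0 (days == 0 raises in both, and a non-positive chunk size is outside the natural domain) and duplicate keys in the association-list encoding (a Python dict cannot hold them).
-- outside the precondition, e.g. on SplitDaysInfo({'a': 1}, -1): A returns [{'a': 1}], B returns []
import Mathlib
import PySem

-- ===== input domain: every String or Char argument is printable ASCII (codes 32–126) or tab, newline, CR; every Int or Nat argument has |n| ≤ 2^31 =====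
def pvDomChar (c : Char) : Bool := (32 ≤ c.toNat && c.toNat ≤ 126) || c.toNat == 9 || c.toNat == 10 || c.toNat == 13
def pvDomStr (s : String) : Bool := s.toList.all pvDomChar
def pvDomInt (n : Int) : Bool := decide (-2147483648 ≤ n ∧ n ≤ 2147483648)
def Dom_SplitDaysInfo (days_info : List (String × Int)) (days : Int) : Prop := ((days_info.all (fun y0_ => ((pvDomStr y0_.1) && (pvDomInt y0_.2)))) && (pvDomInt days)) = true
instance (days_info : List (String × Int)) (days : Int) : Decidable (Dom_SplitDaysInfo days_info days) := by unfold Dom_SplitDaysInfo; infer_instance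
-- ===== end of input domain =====

-- B replaces A's accumulator dict flushed by a modulo test with index-strided slicing of the
-- precomputed item list (idiomatic decomposition, same O(n) cost).

-- ===== PORT A =====
-- The dict argument is the association list; PySem.Dict.mk days_info is that dict (its items ARE
-- days_info). days_info[tmp_date] is ported as getD: the key comes from the dict's own keys, so it
-- is always present and the default 0 is never read.
def SplitDaysInfo (days_info : List (String × Int)) (days : Int) : List (List (String × Int)) :=
  let d := PySem.Dict.mk days_info
  let st := (PySem.List.enumerate d.keys).foldl
    (fun (st : List (List (String × Int)) × PySem.Dict String Int) p =>
      let tmp := st.2.insert p.2 (d.getD p.2 0)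
      if PySem.Int.mod (p.1 + 1) days = 0 then (st.1 ++ [tmp.items], PySem.Dict.empty)
      else (st.1, tmp))
    ([], PySem.Dict.empty)
  if st.2.items.length ≠ 0 then st.1 ++ [st.2.items] else st.1

-- ===== PORT B =====
def SplitDaysInfo_alt (days_info : List (String × Int)) (days : Int) : List (List (String × Int)) :=
  let items := (PySem.Dict.mk days_info).items
  (PySem.List.pyRange 0 (items.length : Int) days).map
    (fun i => (PySem.Dict.ofList (PySem.List.slice items (some i) (some (i + days)))).items)

-- ===== PRECONDITION & SPEC =====
-- Pre_ excludes days ≤ 0 (days == 0 raises — ZeroDivisionError in A, ValueError in B — on non-empty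
-- input, and a non-positive chunk size is outside the natural domain of 'split into chunks of
-- `days` days') and duplicate keys in the association-list encoding (a Python dict cannot hold them).
def Pre_SplitDaysInfo (days_info : List (String × Int)) (days : Int) : Prop :=
  1 ≤ days ∧ (days_info.map Prod.fst).Nodup
instance (days_info : List (String × Int)) (days : Int) : Decidable (Pre_SplitDaysInfo days_info days) := by unfold Pre_SplitDaysInfo; infer_instance
def pvWitness_SplitDaysInfo : (List (String × Int)) × Int := ([("a", 1), ("b", 2), ("c", 3)], 2)

def Spec_SplitDaysInfo (days_info : List (String × Int)) (days : Int) (out : List (List (String × Int))) : Prop := out = SplitDaysInfo_alt days_info days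
instance (days_info : List (String × Int)) (days : Int) (out : List (List (String × Int))) : Decidable (Spec_SplitDaysInfo days_info days out) := by unfold Spec_SplitDaysInfo; infer_instance

-- ===== CLAIM (what is proved, stated in full; the proofs are below) =====
def Claim_equal_SplitDaysInfo : Prop := ∀ (days_info : List (String × Int)) (days : Int), Dom_SplitDaysInfo days_info days → Pre_SplitDaysInfo days_info days → Spec_SplitDaysInfo days_info days (SplitDaysInfo days_info days)

-- ===== LEMMAS AND PROOFS =====

-- the common value: the list cut into chunks of d (last chunk shorter), for 1 ≤ d
def pvChunks {α : Type} (d : Nat) : List α → List (List α)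
  | [] => []
  | x :: xs => (x :: xs.take (d - 1)) :: pvChunks d (xs.drop (d - 1))
termination_by l => l.length
decreasing_by simp

theorem pvChunks_nil {α : Type} (d : Nat) : pvChunks (α := α) d [] = [] := by
  rw [pvChunks.eq_def]

theorem pvChunks_cons {α : Type} (d : Nat) (x : α) (xs : List α) :
    pvChunks d (x :: xs) = (x :: xs.take (d - 1)) :: pvChunks d (xs.drop (d - 1)) := by
  rw [pvChunks.eq_def]

theorem pvChunks_short {α : Type} (d : Nat) (l : List α) (h1 : l ≠ []) (h2 : l.length ≤ d) :
    pvChunks d l = [l] := by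
  cases l with
  | nil => exact absurd rfl h1
  | cons x xs =>
    simp only [List.length_cons] at h2
    rw [pvChunks_cons, List.take_of_length_le (by omega), List.drop_eq_nil_of_le (by omega),
      pvChunks_nil]

theorem pvChunks_append {α : Type} (d : Nat) (l1 l2 : List α) (h : l1.length = d) (hd : 1 ≤ d) :
    pvChunks d (l1 ++ l2) = l1 :: pvChunks d l2 := by
  cases l1 with
  | nil => simp at h; omega
  | cons x xs =>
    simp only [List.length_cons] at h
    rw [List.cons_append, pvChunks_cons, List.take_left' (by omega), List.drop_left' (by omega)]

theorem pvRange_cons (a b s : Int) (hs : 0 < s) (hab : a < b) :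
    PySem.List.pyRange a b s = a :: PySem.List.pyRange (a + s) b s := by
  rw [PySem.List.pyRange_of_pos a b hs, PySem.List.pyRange_of_pos (a + s) b hs]
  have hdiv : (b - a + s - 1) / s = (b - a - 1) / s + 1 := by
    have h1 : b - a + s - 1 = (b - a - 1) + 1 * s := by ring
    rw [h1, Int.add_mul_ediv_right _ _ (by omega : s ≠ 0)]
  by_cases h2 : a + s < b
  · have hnn : 0 ≤ (b - a - 1) / s := Int.ediv_nonneg (by omega) (by omega)
    have hcnt : (if a < b then ((b - a + s - 1) / s).toNat else 0)
        = ((b - (a + s) + s - 1) / s).toNat + 1 := by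
      rw [if_pos hab]
      have h3 : b - (a + s) + s - 1 = b - a - 1 := by ring
      rw [h3, hdiv]; omega
    rw [hcnt, if_pos h2, List.range_succ_eq_map, List.map_cons, List.map_map]
    congr 1
    · simp
    · apply List.map_congr_left; intro k _
      simp only [Function.comp_apply, Nat.succ_eq_add_one]
      push_cast; ring
  · have hz : (b - a - 1) / s = 0 := Int.ediv_eq_zero_of_lt (by omega) (by omega)
    have hcnt : (if a < b then ((b - a + s - 1) / s).toNat else 0) = 1 := by
      rw [if_pos hab, hdiv, hz]; rfl
    rw [hcnt, if_neg h2]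
    simp

theorem pvRange_nil (a b s : Int) (hs : 0 < s) (hab : b ≤ a) :
    PySem.List.pyRange a b s = [] := by
  rw [PySem.List.pyRange_of_pos a b hs, if_neg (by omega)]
  simp

theorem pvOfList_items {l : List (String × Int)} (h : (l.map Prod.fst).Nodup) :
    (PySem.Dict.ofList l).items = l := by
  show (l.foldl (fun acc p => acc.insert p.1 p.2) PySem.Dict.empty).items = l
  rw [PySem.Dict.items_foldl_insert_fresh l (fun p => p.1) (fun p => p.2) PySem.Dict.empty
      (by intro a _; simp) h]
  simp [PySem.Dict.empty]

theorem pvEnumerate_map {α β : Type} (f : α → β) (l : List α) (s : Int) :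
    PySem.List.enumerate (l.map f) s
      = (PySem.List.enumerate l s).map (fun p => (p.1, f p.2)) := by
  induction l generalizing s with
  | nil => simp [PySem.List.enumerate_nil]
  | cons x xs ih => simp [PySem.List.enumerate_cons, ih]

theorem pvB_loop (s : Int) (hs : 1 ≤ s) (full : List (String × Int))
    (hnd : (full.map Prod.fst).Nodup) :
    ∀ (n : Nat) (a : Int), 0 ≤ a → n = full.length - a.toNat →
    (PySem.List.pyRange a (full.length : Int) s).map
        (fun i => (PySem.Dict.ofList (PySem.List.slice full (some i) (some (i + s)))).items)
      = pvChunks s.toNat (full.drop a.toNat) := by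
  intro n
  induction n using Nat.strong_induction_on with
  | _ n ih =>
    intro a ha hn
    by_cases hlt : a < (full.length : Int)
    · rw [pvRange_cons a _ s (by omega) hlt, List.map_cons]
      have hsl : PySem.List.slice full (some a) (some (a + s))
          = (full.drop a.toNat).take s.toNat := by
        rw [PySem.List.slice_toNat full ha (by omega)]
        congr 1; omega
      have hdrop_ne : full.drop a.toNat ≠ [] := by
        intro hcon
        have := congrArg List.length hcon
        simp at this; omega
      obtain ⟨x, xs, hxxs⟩ := List.exists_cons_of_ne_nil hdrop_ne
      obtain ⟨d', hd'⟩ : ∃ d', s.toNat = d' + 1 := ⟨s.toNat - 1, by omega⟩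
      have hsub : ((full.drop a.toNat).take s.toNat).Sublist full :=
        ((full.drop a.toNat).take_sublist s.toNat).trans (full.drop_sublist a.toNat)
      have hnd' : (((full.drop a.toNat).take s.toNat).map Prod.fst).Nodup :=
        hnd.sublist (hsub.map Prod.fst)
      rw [hsl, pvOfList_items hnd', hxxs, pvChunks_cons]
      have htl : (PySem.List.pyRange (a + s) (full.length : Int) s).map
          (fun i => (PySem.Dict.ofList (PySem.List.slice full (some i) (some (i + s)))).items)
          = pvChunks s.toNat (full.drop (a + s).toNat) := by
        apply ih (full.length - (a + s).toNat) (by omega) (a + s) (by omega) rfl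
      congr 1
      · rw [hd', List.take_succ_cons]
        simp
      · rw [htl]
        congr 1
        have h1 : xs.drop (s.toNat - 1) = (x :: xs).drop s.toNat := by
          rw [hd']; simp
        rw [h1, ← hxxs, List.drop_drop]
        congr 1
        omega
    · rw [pvRange_nil a _ s (by omega) (by omega),
        List.drop_eq_nil_of_le (by omega : full.length ≤ a.toNat), List.map_nil, pvChunks_nil]

theorem pvMod_succ (s idx0 : Int) :
    (idx0 + 1) % s = (idx0 % s + 1) % s := by
  conv_rhs => rw [Int.add_emod, Int.emod_emod_of_dvd _ (dvd_refl s), ← Int.add_emod]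

theorem pvA_loop (s : Int) (hs : 1 ≤ s) :
    ∀ (l : List (String × Int)) (idx0 : Int) (acc : List (List (String × Int)))
      (tmp : PySem.Dict String Int),
    ((tmp.items ++ l).map Prod.fst).Nodup →
    ((tmp.items.length : Int) = PySem.Int.mod idx0 s) →
    (let st := (PySem.List.enumerate l idx0).foldl
        (fun (st : List (List (String × Int)) × PySem.Dict String Int) p =>
          let t := st.2.insert p.2.1 p.2.2
          if PySem.Int.mod (p.1 + 1) s = 0 then (st.1 ++ [t.items], PySem.Dict.empty)
          else (st.1, t))
        (acc, tmp)
     if st.2.items.length ≠ 0 then st.1 ++ [st.2.items] else st.1)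
      = acc ++ pvChunks s.toNat (tmp.items ++ l) := by
  intro l
  induction l with
  | nil =>
    intro idx0 acc tmp hnd hsz
    have hmodpos : (0 : Int) < s := by omega
    simp only [PySem.List.enumerate_nil, List.foldl_nil, List.append_nil]
    show (if tmp.items.length ≠ 0 then acc ++ [tmp.items] else acc) = acc ++ pvChunks s.toNat tmp.items
    have hlt : (tmp.items.length : Int) < s := by
      rw [hsz]; exact PySem.Int.mod_lt idx0 (by omega)
    by_cases hz : tmp.items.length = 0
    · have h0 : tmp.items = [] := List.eq_nil_of_length_eq_zero hz
      rw [h0]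
      simp [pvChunks_nil]
    · rw [if_pos hz, pvChunks_short s.toNat tmp.items
        (fun h => hz (by rw [h]; rfl)) (by omega)]
  | cons p l ih =>
    intro idx0 acc tmp hnd hsz
    have hmodpos : (0 : Int) < s := by omega
    have he : idx0 % s = (tmp.items.length : Int) := by
      rw [← PySem.Int.mod_eq_emod_of_pos hmodpos, ← hsz]
    have hnotmem : p.1 ∉ tmp.items.map Prod.fst := by
      rw [List.map_append] at hnd
      have hdisj := (List.nodup_append.mp hnd).2.2
      intro hmem
      exact hdisj p.1 hmem p.1 (by simp) rfl
    have hndl : (l.map Prod.fst).Nodup := by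
      rw [List.map_append] at hnd
      have := (List.nodup_append.mp hnd).2.1
      simp only [List.map_cons] at this
      exact this.of_cons
    have hfresh : tmp.contains p.1 = false := by
      cases hcon : tmp.contains p.1 with
      | false => rfl
      | true => exact absurd ((PySem.Dict.contains_iff_mem_keys tmp p.1).mp hcon) hnotmem
    have hins : (tmp.insert p.1 p.2).items = tmp.items ++ [p] := by
      have := PySem.Dict.items_insert_of_not_contains tmp p.2 hfresh
      simpa using this
    have hlt : (tmp.items.length : Int) < s := by
      rw [hsz]; exact PySem.Int.mod_lt idx0 hmodpos
    rw [PySem.List.enumerate_cons, List.foldl_cons]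
    show
      (let st := (PySem.List.enumerate l (idx0 + 1)).foldl
          (fun (st : List (List (String × Int)) × PySem.Dict String Int) q =>
            let t := st.2.insert q.2.1 q.2.2
            if PySem.Int.mod (q.1 + 1) s = 0 then (st.1 ++ [t.items], PySem.Dict.empty)
            else (st.1, t))
          (if PySem.Int.mod (idx0 + 1) s = 0 then
            (acc ++ [(tmp.insert p.1 p.2).items], PySem.Dict.empty)
          else (acc, tmp.insert p.1 p.2))
       if st.2.items.length ≠ 0 then st.1 ++ [st.2.items] else st.1)
        = acc ++ pvChunks s.toNat (tmp.items ++ p :: l)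
    by_cases hflush : PySem.Int.mod (idx0 + 1) s = 0
    · rw [if_pos hflush]
      have h0 : ((tmp.items.length : Int) + 1) % s = 0 := by
        have h := hflush
        rw [PySem.Int.mod_eq_emod_of_pos hmodpos, pvMod_succ s idx0, he] at h
        exact h
      have hdvd := Int.dvd_of_emod_eq_zero h0
      have hles := Int.le_of_dvd (by omega) hdvd
      have hlen : tmp.items.length + 1 = s.toNat := by omega
      have hIH := ih (idx0 + 1) (acc ++ [(tmp.insert p.1 p.2).items]) PySem.Dict.empty
        (by simpa [PySem.Dict.empty] using hndl)
        (by rw [hflush]; simp [PySem.Dict.empty])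
      rw [hIH, hins]
      have hsplit : tmp.items ++ p :: l = (tmp.items ++ [p]) ++ l := by simp
      rw [hsplit, pvChunks_append s.toNat (tmp.items ++ [p]) l (by simp; omega) (by omega)]
      simp [PySem.Dict.empty]
    · rw [if_neg hflush]
      have hne : (tmp.items.length : Int) + 1 ≠ s := by
        intro hcon
        apply hflush
        rw [PySem.Int.mod_eq_emod_of_pos hmodpos, pvMod_succ s idx0, he, hcon]
        simp
      have hsz' : (((tmp.insert p.1 p.2).items.length : Int)) = PySem.Int.mod (idx0 + 1) s := by
        have hl1 : (tmp.insert p.1 p.2).items.length = tmp.items.length + 1 := by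
          rw [hins]; simp
        rw [hl1, PySem.Int.mod_eq_emod_of_pos hmodpos, pvMod_succ s idx0, he,
          Int.emod_eq_of_lt (by omega) (by omega)]
        push_cast; ring
      have hIH := ih (idx0 + 1) acc (tmp.insert p.1 p.2)
        (by rw [hins]; simpa [List.append_assoc] using hnd) hsz'
      rw [hIH, hins]
      simp

-- B's port computes pvChunks
theorem pvAlt_eq (days_info : List (String × Int)) (days : Int) (hdays : 1 ≤ days)
    (hnd : (days_info.map Prod.fst).Nodup) :
    SplitDaysInfo_alt days_info days = pvChunks days.toNat days_info := by
  have h := pvB_loop days hdays days_info hnd (days_info.length - (0 : Int).toNat) 0 le_rfl rfl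
  simp only [Int.toNat_zero, List.drop_zero] at h
  simpa [SplitDaysInfo_alt] using h

theorem pvA_eq (days_info : List (String × Int)) (days : Int) (hdays : 1 ≤ days)
    (hnd : (days_info.map Prod.fst).Nodup) :
    SplitDaysInfo days_info days = pvChunks days.toNat days_info := by
  have hmodpos : (0 : Int) < days := by omega
  have hkeys : (PySem.Dict.mk days_info).keys = days_info.map Prod.fst :=
    PySem.Dict.keys_mk days_info
  have hfold : (PySem.List.enumerate ((PySem.Dict.mk days_info).keys)).foldl
      (fun (st : List (List (String × Int)) × PySem.Dict String Int) p =>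
        let tmp := st.2.insert p.2 ((PySem.Dict.mk days_info).getD p.2 0)
        if PySem.Int.mod (p.1 + 1) days = 0 then (st.1 ++ [tmp.items], PySem.Dict.empty)
        else (st.1, tmp))
      ([], PySem.Dict.empty)
      = (PySem.List.enumerate days_info 0).foldl
      (fun (st : List (List (String × Int)) × PySem.Dict String Int) p =>
        let t := st.2.insert p.2.1 p.2.2
        if PySem.Int.mod (p.1 + 1) days = 0 then (st.1 ++ [t.items], PySem.Dict.empty)
        else (st.1, t))
      ([], PySem.Dict.empty) := by
    rw [hkeys, pvEnumerate_map Prod.fst days_info 0, List.foldl_map]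
    apply PySem.List.foldl_congr_mem
    intro acc q hq
    have hq2 : q.2 ∈ days_info := by
      have hmse := PySem.List.map_snd_enumerate days_info 0
      exact hmse ▸ List.mem_map_of_mem hq
    have hget : (PySem.Dict.mk days_info).getD q.2.1 0 = q.2.2 := by
      apply PySem.Dict.getD_of_mem_items (PySem.Dict.mk days_info)
        (by simpa using hq2) (by rw [hkeys]; exact hnd)
    simp [hget]
  have hA := pvA_loop days hdays days_info 0 [] PySem.Dict.empty
    (by simpa [PySem.Dict.empty] using hnd)
    (by simp [PySem.Dict.empty, PySem.Int.mod_eq_emod_of_pos hmodpos])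
  simp only [PySem.Dict.empty, List.nil_append] at hA
  simp only [SplitDaysInfo]
  rw [hfold]
  simpa [PySem.Dict.empty] using hA


-- ===== VERDICT (by name: the statement is the Claim_ definition above) =====
theorem SplitDaysInfo_spec : Claim_equal_SplitDaysInfo := by
  intro days_info days _hdom hpre
  obtain ⟨hdays, hnd⟩ := hpre
  unfold Spec_SplitDaysInfo
  rw [pvA_eq days_info days hdays hnd, pvAlt_eq days_info days hdays hnd]
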